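-- pv_equiv track=rewrite | github.com/SeekingX-AILab/SeekingContext | src/seeking_context/storage/sqlite_store.py | _sanitise_fts_query
-- ===== SOURCE A (Python) =====
-- def _sanitise_fts_query(query: str) -> str:
--     """Sanitise a user query for FTS5 MATCH syntax.
--
--     Removes special FTS5 operators to prevent syntax
--     errors while preserving search intent.
--
--     Args:
--         query: Raw user query.
--
--     Returns:
--         Sanitised query safe for FTS5 MATCH.
--     """
--     # Remove FTS5 special chars
--     cleaned = ""
--     for ch in query:
--         if ch.isalnum() or ch in " _-":
--             cleaned += ch
--         else:
--             cleaned += " "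
--     # Collapse whitespace
--     tokens = cleaned.split()
--     if not tokens:
--         return ""
--     return " ".join(tokens)
-- ===== SOURCE B (Python) =====
-- def _sanitise_fts_query(query: str) -> str:
--     """Single forward pass: accumulate allowed characters, flush completed
--     tokens at each separator; no intermediate cleaned string, no split()."""
--     tokens = []
--     cur = []
--     for ch in query:
--         if ch.isalnum() or ch in "_-":
--             cur.append(ch)
--         elif cur:
--             tokens.append("".join(cur))
--             cur = []
--     if cur:
--         tokens.append("".join(cur))
--     return " ".join(tokens)
-- ===== Notes on version B (the rewrite author's own statement) =====
-- stated objective: alternative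
-- what changed: Replaced A's two-pass build-a-cleaned-string-then-split()-then-join with a single forward pass that accumulates token characters and flushes completed tokens into a list at each separator, never materialising the cleaned string.
import Mathlib
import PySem

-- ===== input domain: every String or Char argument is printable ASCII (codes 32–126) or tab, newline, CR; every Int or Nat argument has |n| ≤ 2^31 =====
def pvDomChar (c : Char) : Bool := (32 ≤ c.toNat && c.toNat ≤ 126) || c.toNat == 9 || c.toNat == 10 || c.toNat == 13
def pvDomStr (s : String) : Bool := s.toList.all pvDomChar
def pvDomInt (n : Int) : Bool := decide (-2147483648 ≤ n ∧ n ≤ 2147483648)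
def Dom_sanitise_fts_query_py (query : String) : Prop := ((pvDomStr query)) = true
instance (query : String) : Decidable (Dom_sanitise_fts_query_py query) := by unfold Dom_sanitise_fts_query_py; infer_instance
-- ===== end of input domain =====

-- B replaces A's two-pass clean-then-split()-then-join with a single forward pass
-- that flushes completed tokens at each separator (objective: alternative decomposition).

-- ===== PORT A =====
-- A: build `cleaned` char by char (allowed chars kept, others replaced by ' '),
-- then split on whitespace and rejoin with single spaces.
def sanitise_fts_query_py (query : String) : String :=
  let cleaned : List Char :=
    query.toList.foldl
      (fun acc ch =>
        if PySem.Chars.isalnum ch || PySem.Chars.isIn [ch] " _-".toList then acc ++ [ch]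
        else acc ++ [' '])
      []
  let tokens := PySem.Chars.split₀ cleaned
  if tokens.isEmpty then "" else String.ofList (PySem.Chars.join [' '] tokens)

-- ===== PORT B =====
-- B: one pass; `cur` accumulates the current token, finished tokens are flushed into `tokens`.
def bStep (st : List (List Char) × List Char) (ch : Char) : List (List Char) × List Char :=
  if PySem.Chars.isalnum ch || ch == '_' || ch == '-' then (st.1, st.2 ++ [ch])
  else if st.2.isEmpty then st else (st.1 ++ [st.2], [])

def sanitise_fts_query_py_alt (query : String) : String :=
  let st := query.toList.foldl bStep ([], [])
  let tokens := if st.2.isEmpty then st.1 else st.1 ++ [st.2]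
  String.ofList (PySem.Chars.join [' '] tokens)

-- ===== PRECONDITION & SPEC =====
def Spec_sanitise_fts_query_py (query : String) (out : String) : Prop := out = sanitise_fts_query_py_alt query
instance (query : String) (out : String) : Decidable (Spec_sanitise_fts_query_py query out) := by unfold Spec_sanitise_fts_query_py; infer_instance

-- ===== CLAIM (what is proved, stated in full; the proofs are below) =====
def Claim_equal_sanitise_fts_query_py : Prop := ∀ (query : String), Dom_sanitise_fts_query_py query → Spec_sanitise_fts_query_py query (sanitise_fts_query_py query)

-- ===== LEMMAS AND PROOFS =====

-- A's per-character replacement as a function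
def gClean (c : Char) : Char :=
  if PySem.Chars.isalnum c || PySem.Chars.isIn [c] " _-".toList then c else ' '

-- B's word-character test
def bWord (c : Char) : Bool :=
  PySem.Chars.isalnum c || c == '_' || c == '-'

theorem char_le_iff (a b : Char) : a ≤ b ↔ a.toNat ≤ b.toNat := ⟨Fin.mk_le_mk.mp, Fin.mk_le_mk.mpr⟩

theorem isIn_singleton_dash (c : Char) :
    PySem.Chars.isIn [c] " _-".toList = (c == ' ' || c == '_' || c == '-') := by
  rw [Bool.eq_iff_iff, PySem.Chars.isIn_iff_infix, List.singleton_infix_iff,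
      (by decide : " _-".toList = [' ', '_', '-'])]
  simp [List.mem_cons, or_assoc]

theorem notspace_of_range (c : Char) (h1 : 33 ≤ c.toNat) (h2 : c.toNat ≤ 126) :
    PySem.Chars.isspace c = false := by
  unfold PySem.Chars.isspace
  simp only [Bool.or_eq_false_iff, Bool.and_eq_false_iff, decide_eq_false_iff_not]
  omega

theorem bWord_not_space (c : Char) (h : bWord c = true) : PySem.Chars.isspace c = false := by
  unfold bWord PySem.Chars.isalnum PySem.Chars.isalpha PySem.Chars.isdigit
    PySem.Chars.isupper PySem.Chars.islower at h
  simp only [Bool.or_eq_true, Bool.and_eq_true, decide_eq_true_eq, beq_iff_eq] at h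
  rcases h with (((⟨h1, h2⟩ | ⟨h1, h2⟩) | ⟨h1, h2⟩) | h) | h
  · exact notspace_of_range c
      (by have : 65 ≤ c.toNat := char_le_iff _ _ |>.mp h1; omega)
      (by have : c.toNat ≤ 90 := char_le_iff _ _ |>.mp h2; omega)
  · exact notspace_of_range c
      (by have : 97 ≤ c.toNat := char_le_iff _ _ |>.mp h1; omega)
      (by have : c.toNat ≤ 122 := char_le_iff _ _ |>.mp h2; omega)
  · exact notspace_of_range c
      (by have : 48 ≤ c.toNat := char_le_iff _ _ |>.mp h1; omega)
      (by have : c.toNat ≤ 57 := char_le_iff _ _ |>.mp h2; omega)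
  · subst h; decide
  · subst h; decide

theorem gClean_of_bWord (c : Char) (h : bWord c = true) : gClean c = c := by
  unfold gClean
  unfold bWord at h
  rw [isIn_singleton_dash]
  rcases Bool.or_eq_true .. |>.mp h with h' | h'
  · rcases Bool.or_eq_true .. |>.mp h' with h2 | h2 <;> simp [h2]
  · simp [h']

theorem gClean_of_not_bWord (c : Char) (h : bWord c = false) : gClean c = ' ' := by
  unfold gClean
  unfold bWord at h
  rw [isIn_singleton_dash]
  simp only [Bool.or_eq_false_iff] at h
  obtain ⟨⟨h1, h2⟩, h3⟩ := h
  rcases hc : (c == ' ') with _ | _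
  · simp [h1, h2, h3]
  · simp only [beq_iff_eq] at hc
    subst hc
    simp [h1, h2, h3]

theorem space_isspace : PySem.Chars.isspace ' ' = true := by decide

-- A's foldl builds exactly the pointwise-mapped string
theorem cleaned_eq_map (cs : List Char) (acc : List Char) :
    cs.foldl
      (fun acc ch =>
        if PySem.Chars.isalnum ch || PySem.Chars.isIn [ch] " _-".toList then acc ++ [ch]
        else acc ++ [' '])
      acc = acc ++ cs.map gClean := by
  induction cs generalizing acc with
  | nil => simp
  | cons c cs ih =>
    simp only [List.foldl_cons, List.map_cons]
    rw [ih]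
    unfold gClean
    split <;> simp

-- the core invariant: split₀'s worker on the mapped string computes B's fold
theorem go_eq_fold (cs : List Char) (rcur : List Char) (rtoks : List (List Char)) :
    PySem.Chars.split₀.go (cs.map gClean) rcur rtoks =
      (let st := cs.foldl bStep (rtoks.reverse, rcur.reverse)
       if st.2.isEmpty then st.1 else st.1 ++ [st.2]) := by
  induction cs generalizing rcur rtoks with
  | nil =>
    simp only [List.map_nil, PySem.Chars.split₀.go, List.foldl_nil]
    rcases rcur with _ | ⟨c, rcur⟩ <;> simp
  | cons c cs ih =>
    simp only [List.map_cons, List.foldl_cons]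
    rcases hw : bWord c with _ | _
    · rw [gClean_of_not_bWord c hw]
      have hstep : bStep (rtoks.reverse, rcur.reverse) c =
          if rcur.reverse.isEmpty then (rtoks.reverse, rcur.reverse)
          else (rtoks.reverse ++ [rcur.reverse], []) := by
        unfold bStep bWord at *
        simp [hw]
      rcases rcur with _ | ⟨c', rcur'⟩
      · simp only [PySem.Chars.split₀.go, space_isspace, if_true, List.isEmpty_nil] at *
        rw [ih, hstep]
        simp
      · simp only [PySem.Chars.split₀.go, space_isspace, if_true] at *
        rw [(by simp : ((c' :: rcur').isEmpty) = false)]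
        simp only [Bool.false_eq_true, if_false]
        rw [ih, hstep]
        simp
    · rw [gClean_of_bWord c hw]
      simp only [PySem.Chars.split₀.go, bWord_not_space c hw, Bool.false_eq_true, if_false]
      rw [ih]
      have hstep : bStep (rtoks.reverse, rcur.reverse) c =
          (rtoks.reverse, rcur.reverse ++ [c]) := by
        unfold bStep bWord at *
        simp [hw]
      rw [hstep]
      simp

theorem split₀_eq_fold (cs : List Char) :
    PySem.Chars.split₀ (cs.map gClean) =
      (let st := cs.foldl bStep ([], [])
       if st.2.isEmpty then st.1 else st.1 ++ [st.2]) := by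
  unfold PySem.Chars.split₀
  simpa using go_eq_fold cs [] []

-- ===== VERDICT (by name: the statement is the Claim_ definition above) =====
theorem sanitise_fts_query_py_spec : Claim_equal_sanitise_fts_query_py := by
  intro query _
  unfold Spec_sanitise_fts_query_py sanitise_fts_query_py sanitise_fts_query_py_alt
  simp only [cleaned_eq_map query.toList [], List.nil_append, split₀_eq_fold query.toList]
  rcases h : (if (query.toList.foldl bStep ([], [])).2.isEmpty then
      (query.toList.foldl bStep ([], [])).1
    else (query.toList.foldl bStep ([], [])).1 ++ [(query.toList.foldl bStep ([], [])).2]) with _ | ⟨t, ts⟩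
  · rfl
  · simp
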